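-- pv_equiv track=rewrite | github.com/cielavenir/procon | hena/tyama_henae15.py | num2place
-- ===== SOURCE A (Python) =====
-- def num2place(n):
-- 	x=y=0
-- 	z=1
-- 	while n>0:
-- 		if n%3==1:
-- 			x+=z
-- 		elif n%3==2:
-- 			y+=z
-- 		n//=3
-- 		z*=2
-- 	return (x,y)
-- ===== SOURCE B (Python) =====
-- def num2place(n):
-- 	digits = []
-- 	while n > 0:
-- 		digits.append(n % 3)
-- 		n //= 3
-- 	x = sum(2**i for i, d in enumerate(digits) if d == 1)
-- 	y = sum(2**i for i, d in enumerate(digits) if d == 2)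
-- 	return (x, y)
-- ===== Notes on version B (the rewrite author's own statement) =====
-- stated objective: alternative
-- what changed: Materializes the base-3 digit list once, then computes each bitmask in its own separate enumerate/sum pass, instead of one interleaved loop maintaining x, y and a doubling weight z.
import Mathlib
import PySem

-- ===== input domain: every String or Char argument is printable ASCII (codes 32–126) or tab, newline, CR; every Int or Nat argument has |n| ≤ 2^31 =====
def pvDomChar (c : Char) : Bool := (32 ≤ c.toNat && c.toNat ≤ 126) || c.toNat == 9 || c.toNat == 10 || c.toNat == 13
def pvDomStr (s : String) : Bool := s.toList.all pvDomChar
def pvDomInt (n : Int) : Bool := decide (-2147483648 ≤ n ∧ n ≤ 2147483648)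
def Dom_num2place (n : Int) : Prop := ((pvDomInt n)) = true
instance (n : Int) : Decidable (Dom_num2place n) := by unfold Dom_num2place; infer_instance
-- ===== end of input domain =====

-- B materializes the base-3 digit list once and computes each mask in a separate pass (alternative decomposition, same cost).

-- ===== PORT A =====
-- the while loop of A: state (x, y, z), n //= 3 each turn; fuel = n.toNat bounds the
-- iteration count (n.toNat strictly decreases each turn), a pure totalization guard
def num2placeLoop (fuel : Nat) (n x y z : Int) : Int × Int :=
  match fuel with
  | 0 => (x, y)
  | f + 1 =>
    if 0 < n then
      num2placeLoop f (PySem.Int.floordiv n 3)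
        (if PySem.Int.mod n 3 = 1 then x + z else x)
        (if PySem.Int.mod n 3 ≠ 1 ∧ PySem.Int.mod n 3 = 2 then y + z else y)
        (z * 2)
    else (x, y)

def num2place (n : Int) : Int × Int := num2placeLoop n.toNat n 0 0 1

-- ===== PORT B =====
-- digits=[]; while n>0: digits.append(n%3); n//=3   (same fuel guard)
def num2placeDigits (fuel : Nat) (n : Int) : List Int :=
  match fuel with
  | 0 => []
  | f + 1 =>
    if 0 < n then PySem.Int.mod n 3 :: num2placeDigits f (PySem.Int.floordiv n 3)
    else []

def num2place_alt (n : Int) : Int × Int :=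
  let digits := num2placeDigits n.toNat n
  ((((PySem.List.enumerate digits 0).filter (fun p => p.2 == 1)).map
      (fun p => (2 : Int) ^ p.1.toNat)).sum,
   (((PySem.List.enumerate digits 0).filter (fun p => p.2 == 2)).map
      (fun p => (2 : Int) ^ p.1.toNat)).sum)

-- ===== PRECONDITION & SPEC =====
def Spec_num2place (n : Int) (out : Int × Int) : Prop := out = num2place_alt n
instance (n : Int) (out : Int × Int) : Decidable (Spec_num2place n out) := by unfold Spec_num2place; infer_instance

-- ===== CLAIM (what is proved, stated in full; the proofs are below) =====
def Claim_equal_num2place : Prop := ∀ (n : Int), Dom_num2place n → Spec_num2place n (num2place n)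

-- ===== LEMMAS AND PROOFS =====

-- the mask B computes over a digit list, with the enumeration starting at s
def pvMaskFrom (ds : List Int) (t : Int) (s : Nat) : Int :=
  (((PySem.List.enumerate ds (s : Int)).filter (fun p => p.2 == t)).map
      (fun p => (2 : Int) ^ p.1.toNat)).sum

lemma pvMaskFrom_nil (t : Int) (s : Nat) : pvMaskFrom [] t s = 0 := by
  simp [pvMaskFrom, PySem.List.enumerate]

lemma pvMaskFrom_cons (d : Int) (ds : List Int) (t : Int) (s : Nat) :
    pvMaskFrom (d :: ds) t s =
      (if d = t then (2 : Int) ^ s else 0) + pvMaskFrom ds t (s + 1) := by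
  have h1 : ((s : Int) + 1) = ((s + 1 : Nat) : Int) := by push_cast; ring
  simp only [pvMaskFrom, PySem.List.enumerate_cons, h1, List.filter_cons]
  by_cases h : d = t
  · simp [h]
  · simp [h]

lemma pvMaskFrom_shift (ds : List Int) (t : Int) (s : Nat) :
    pvMaskFrom ds t (s + 1) = 2 * pvMaskFrom ds t s := by
  induction ds generalizing s with
  | nil => simp [pvMaskFrom_nil]
  | cons d ds ih =>
    rw [pvMaskFrom_cons, pvMaskFrom_cons, ih (s + 1)]
    split_ifs <;> ring

lemma num2placeLoop_eq (k : Nat) :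
    ∀ (n x y z : Int), n.toNat ≤ k →
      num2placeLoop k n x y z =
        (x + z * pvMaskFrom (num2placeDigits k n) 1 0,
         y + z * pvMaskFrom (num2placeDigits k n) 2 0) := by
  induction k with
  | zero =>
    intro n x y z hk
    simp [num2placeLoop, num2placeDigits, pvMaskFrom_nil]
  | succ k ih =>
    intro n x y z hk
    by_cases hn : 0 < n
    · have hdiv : PySem.Int.floordiv n 3 = n / 3 :=
        PySem.Int.floordiv_eq_ediv_of_pos (by omega)
      have hrec : (PySem.Int.floordiv n 3).toNat ≤ k := by
        rw [hdiv]; omega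
      rw [num2placeLoop, num2placeDigits]
      simp only [hn, if_true]
      rw [ih _ _ _ _ hrec]
      rw [pvMaskFrom_cons, pvMaskFrom_cons, pvMaskFrom_shift, pvMaskFrom_shift]
      have hmod : PySem.Int.mod n 3 = n % 3 := PySem.Int.mod_eq_emod_of_pos (by omega)
      have h3 : n % 3 = 0 ∨ n % 3 = 1 ∨ n % 3 = 2 := by omega
      rcases h3 with h | h | h <;>
        simp only [hmod, h, hdiv] <;> norm_num <;> constructor <;> ring
    · rw [num2placeLoop, num2placeDigits]
      simp [hn, pvMaskFrom_nil]

-- ===== VERDICT (by name: the statement is the Claim_ definition above) =====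
theorem num2place_spec : Claim_equal_num2place := by
  intro n _
  show num2place n = num2place_alt n
  have h := num2placeLoop_eq n.toNat n 0 0 1 (le_refl _)
  rw [num2place, h, num2place_alt]
  simp [pvMaskFrom]
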